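-- pv_equiv track=rewrite | github.com/zhengjunyao-work/arc24 | scripts/concatenate_submissions.py | concatenate_submissions
-- ===== SOURCE A (Python) =====
-- def concatenate_submissions(submissions):
--     concatenated_submission = create_empty_submission(submissions)
--     for submission in submissions:
--         for task_id, task_predictions in submission.items():
--             for sample_idx, sample_predictions in enumerate(task_predictions):
--                 sample_predictions = list(sample_predictions.values())
--                 for attempt_idx, prediction in enumerate(sample_predictions, len(concatenated_submission[task_id][sample_idx]) + 1):
--                     concatenated_submission[task_id][sample_idx][f'attempt_{attempt_idx}'] = prediction
--     return concatenated_submission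
--
-- def create_empty_submission(submissions):
--     empty_submission = dict()
--     task_ids = []
--     for submission in submissions:
--         task_ids.extend(list(submission.keys()))
--     task_ids = set(task_ids)
--     for task_id in task_ids:
--         max_samples = 0
--         for submission in submissions:
--             if task_id in submission:
--                 max_samples = max(max_samples, len(submission[task_id]))
--         empty_submission[task_id] = [dict() for _ in range(max_samples)]
--     return empty_submission
-- ===== SOURCE B (Python) =====
-- def concatenate_submissions(submissions):
--     # One pass: collect prediction values per (task_id, sample_idx) and the max
--     # sample count per task_id; then emit the merged submission directly.
--     collected = {}
--     nsamples = {}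
--     for submission in submissions:
--         for task_id, preds in submission.items():
--             nsamples[task_id] = max(nsamples.get(task_id, 0), len(preds))
--             for i, sample in enumerate(preds):
--                 collected.setdefault((task_id, i), []).extend(sample.values())
--     return {task_id: [{f'attempt_{j}': p
--                        for j, p in enumerate(collected.get((task_id, i), []), 1)}
--                       for i in range(n)]
--             for task_id, n in nsamples.items()}
-- ===== Notes on version B (the rewrite author's own statement) =====
-- stated objective: simpler
-- what changed: A pre-allocates an empty submission (set of task ids, then a per-task scan over all submissions for the max sample count) and fills it in place, re-reading each sample dict's current length to continue the attempt numbering; B makes one pass collecting the prediction values per (task_id, sample_idx) and the max sample count per task, then emits the whole result with comprehensions, numbering each sample's attempts once from 1.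
import Mathlib
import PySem

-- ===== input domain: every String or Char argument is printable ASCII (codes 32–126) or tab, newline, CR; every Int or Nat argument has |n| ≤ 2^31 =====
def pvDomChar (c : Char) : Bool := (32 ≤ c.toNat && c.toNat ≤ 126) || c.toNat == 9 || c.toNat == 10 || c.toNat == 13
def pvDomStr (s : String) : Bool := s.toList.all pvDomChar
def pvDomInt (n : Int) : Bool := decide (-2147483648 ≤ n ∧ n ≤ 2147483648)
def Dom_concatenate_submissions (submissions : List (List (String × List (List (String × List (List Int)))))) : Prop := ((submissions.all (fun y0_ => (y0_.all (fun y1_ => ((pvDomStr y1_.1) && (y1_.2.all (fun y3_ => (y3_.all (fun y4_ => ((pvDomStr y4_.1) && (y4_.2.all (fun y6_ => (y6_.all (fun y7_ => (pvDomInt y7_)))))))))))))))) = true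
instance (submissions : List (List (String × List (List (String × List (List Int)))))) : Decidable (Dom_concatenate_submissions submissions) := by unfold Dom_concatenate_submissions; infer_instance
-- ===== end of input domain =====

-- B is a simpler one-pass collect-then-emit rewrite of A's pre-allocate-and-fill-in-place merge; return values proved equal on dict-shaped inputs (per-submission keys distinct).

-- ===== PORT A =====
def pvCreateEmpty (submissions : List (List (String × List (List (String × List (List Int)))))) : PySem.Dict String (List (PySem.Dict String (List (List Int)))) :=
  let task_ids : List String := submissions.foldl (fun acc submission => acc ++ submission.map Prod.fst) []
  let task_ids := PySem.Set.ofList task_ids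
  task_ids.foldl (fun emp tid =>
    let max_samples : Nat := submissions.foldl (fun m submission =>
      if (PySem.Dict.mk submission).contains tid then
        max m ((PySem.Dict.mk submission).getD tid []).length
      else m) 0
    emp.insert tid (List.replicate max_samples PySem.Dict.empty)) PySem.Dict.empty

def concatenate_submissions (submissions : List (List (String × List (List (String × List (List Int)))))) : List (String × List (List (String × List (List Int)))) :=
  let conc0 := pvCreateEmpty submissions
  let conc := submissions.foldl (fun conc submission =>
    submission.foldl (fun conc tp =>
      (PySem.List.enumerate tp.2).foldl (fun conc sp =>
        let sample_values : List (List (List Int)) := sp.2.map Prod.snd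
        let start : Int := ((PySem.List.pyGetD (conc.getD tp.1 []) sp.1 PySem.Dict.empty).size : Int) + 1
        (PySem.List.enumerate sample_values start).foldl (fun conc ap =>
          conc.modify tp.1 [] (fun samples =>
            PySem.List.pySetD samples sp.1
              ((PySem.List.pyGetD samples sp.1 PySem.Dict.empty).insert
                ("attempt_" ++ PySem.Int.toStr ap.1) ap.2))) conc) conc) conc) conc0
  conc.items.map (fun p => (p.1, p.2.map PySem.Dict.items))

-- ===== PORT B =====
def concatenate_submissions_alt (submissions : List (List (String × List (List (String × List (List Int)))))) : List (String × List (List (String × List (List Int)))) :=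
  let st := submissions.foldl (fun st submission =>
      submission.foldl (fun st tp =>
        let ns := st.2.insert tp.1 (max (st.2.getD tp.1 0) (tp.2.length : Int))
        let col := (PySem.List.enumerate tp.2).foldl (fun col ip =>
            col.modify (tp.1, ip.1) [] (· ++ ip.2.map Prod.snd)) st.1
        (col, ns)) st)
    ((PySem.Dict.empty : PySem.Dict (String × Int) (List (List (List Int)))),
     (PySem.Dict.empty : PySem.Dict String Int))
  st.2.items.map (fun tn =>
    (tn.1, (PySem.List.pyRange 0 tn.2 1).map (fun i =>
      ((PySem.List.enumerate (st.1.getD (tn.1, i) []) 1).foldl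
        (fun d jp => d.insert ("attempt_" ++ PySem.Int.toStr jp.1) jp.2) PySem.Dict.empty).items)))

-- ===== PRECONDITION & SPEC =====
-- Pre_ requires each submission to have pairwise-distinct task-id keys: a Python dict cannot
-- hold duplicate keys, so this only excludes association lists that do not encode a dict.
def Pre_concatenate_submissions (submissions : List (List (String × List (List (String × List (List Int)))))) : Prop :=
  ∀ s ∈ submissions, (s.map Prod.fst).Nodup
instance (submissions : List (List (String × List (List (String × List (List Int)))))) : Decidable (Pre_concatenate_submissions submissions) := by unfold Pre_concatenate_submissions; infer_instance

def pvWitness_concatenate_submissions : (List (List (String × List (List (String × List (List Int)))))) :=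
  [[("a", [[("x", [[1]])], []])], [("a", [[("y", [[2]])]]), ("b", [])]]

def Spec_concatenate_submissions (submissions : List (List (String × List (List (String × List (List Int)))))) (out : List (String × List (List (String × List (List Int))))) : Prop := out = concatenate_submissions_alt submissions
instance (submissions : List (List (String × List (List (String × List (List Int)))))) (out : List (String × List (List (String × List (List Int))))) : Decidable (Spec_concatenate_submissions submissions out) := by
  unfold Spec_concatenate_submissions
  haveI h2 : DecidableEq (List (List (String × List (List Int)))) := inferInstance
  haveI : DecidableEq (String × List (List (String × List (List Int)))) := @instDecidableEqProd _ _ _ h2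
  infer_instance

-- ===== CLAIM (what is proved, stated in full; the proofs are below) =====
def Claim_equal_concatenate_submissions : Prop := ∀ (submissions : List (List (String × List (List (String × List (List Int)))))), Dom_concatenate_submissions submissions → Pre_concatenate_submissions submissions → Spec_concatenate_submissions submissions (concatenate_submissions submissions)

-- ===== LEMMAS AND PROOFS =====

-- ---- abbreviations used by the proofs ----
abbrev pvSD : Type := PySem.Dict String (List (List Int))
def pvOps (submissions : List (List (String × List (List (String × List (List Int)))))) :
    List ((String × Int) × List (List (List Int))) :=
  submissions.flatMap (fun s => s.flatMap (fun tp =>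
    (PySem.List.enumerate tp.2).map (fun ip => ((tp.1, ip.1), ip.2.map Prod.snd))))
def pvKeysList (submissions : List (List (String × List (List (String × List (List Int)))))) : List String :=
  submissions.flatMap (fun s => s.map Prod.fst)
def pvTaskIds (submissions : List (List (String × List (List (String × List (List Int)))))) : List String :=
  PySem.Set.ofList (pvKeysList submissions)
def pvNmax (submissions : List (List (String × List (List (String × List (List Int)))))) (tid : String) : Nat :=
  submissions.foldl (fun m submission =>
    if (PySem.Dict.mk submission).contains tid then
      max m ((PySem.Dict.mk submission).getD tid []).length
    else m) 0
def pvAttD (vals : List (List (List Int))) : pvSD :=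
  (PySem.List.enumerate vals 1).foldl
    (fun d jp => d.insert ("attempt_" ++ PySem.Int.toStr jp.1) jp.2) PySem.Dict.empty
def pvAttItems (vals : List (List (List Int))) : List (String × List (List Int)) :=
  (PySem.List.enumerate vals 1).map (fun jp => ("attempt_" ++ PySem.Int.toStr jp.1, jp.2))
def pvCollect (submissions : List (List (String × List (List (String × List (List Int)))))) (tid : String) (i : Int) :
    List (List (List Int)) :=
  ((pvOps submissions).filter (fun op => op.1 = (tid, i))).flatMap (fun op => op.2)
def pvCanon (submissions : List (List (String × List (List (String × List (List Int)))))) :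
    List (String × List (List (String × List (List Int)))) :=
  (pvTaskIds submissions).map (fun tid =>
    (tid, (List.range (pvNmax submissions tid)).map (fun (k : Nat) => pvAttItems (pvCollect submissions tid (k : Int)))))

def pvStepT (ss : List pvSD) (op : (String × Int) × List (List (List Int))) : List pvSD :=
  (PySem.List.enumerate op.2 (((PySem.List.pyGetD ss op.1.2 PySem.Dict.empty).size : Int) + 1)).foldl
    (fun ss jp => PySem.List.pySetD ss op.1.2
      ((PySem.List.pyGetD ss op.1.2 PySem.Dict.empty).insert ("attempt_" ++ PySem.Int.toStr jp.1) jp.2)) ss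

def pvStep (c : PySem.Dict String (List pvSD)) (op : (String × Int) × List (List (List Int))) :
    PySem.Dict String (List pvSD) :=
  (PySem.List.enumerate op.2 (((PySem.List.pyGetD (c.getD op.1.1 []) op.1.2 PySem.Dict.empty).size : Int) + 1)).foldl
    (fun c jp => c.modify op.1.1 [] (fun samples =>
      PySem.List.pySetD samples op.1.2
        ((PySem.List.pyGetD samples op.1.2 PySem.Dict.empty).insert
          ("attempt_" ++ PySem.Int.toStr jp.1) jp.2))) c

-- ---- str(n) is injective on nonnegative ints ----
def pvDigVal (ds : List Char) : Nat := ds.foldl (fun a c => a * 10 + (c.toNat - 48)) 0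

lemma pvDigVal_append (xs : List Char) (c : Char) :
    pvDigVal (xs ++ [c]) = pvDigVal xs * 10 + (c.toNat - 48) := by
  simp [pvDigVal, List.foldl_append]

lemma pvDigitChar_val (k : Nat) (h : k < 10) : (Nat.digitChar k).toNat - 48 = k := by
  interval_cases k <;> decide

lemma pvToDigitsCore_append (b : Nat) : ∀ (f n : Nat) (l : List Char),
    Nat.toDigitsCore b f n l = Nat.toDigitsCore b f n [] ++ l := by
  intro f
  induction f with
  | zero => intro n l; simp [Nat.toDigitsCore]
  | succ f ih =>
    intro n l
    simp only [Nat.toDigitsCore]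
    by_cases h : n / b = 0
    · simp [h]
    · simp only [h, if_false]
      rw [ih (n / b) (Nat.digitChar (n % b) :: l), ih (n / b) [Nat.digitChar (n % b)]]
      simp

lemma pvToDigitsCore_val : ∀ (f n : Nat), n < f → pvDigVal (Nat.toDigitsCore 10 f n []) = n := by
  intro f
  induction f with
  | zero => intro n h; omega
  | succ f ih =>
    intro n h
    simp only [Nat.toDigitsCore]
    by_cases h10 : n / 10 = 0
    · simp only [h10, if_true]
      have := pvDigitChar_val (n % 10) (by omega)
      simp [pvDigVal]
      omega
    · simp only [h10, if_false]
      rw [pvToDigitsCore_append]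
      rw [pvDigVal_append, ih (n / 10) (by omega), pvDigitChar_val (n % 10) (by omega)]
      omega

lemma pvToDigits_inj (m n : Nat) (h : Nat.toDigits 10 m = Nat.toDigits 10 n) : m = n := by
  have hm := pvToDigitsCore_val (m + 1) m (by omega)
  have hn := pvToDigitsCore_val (n + 1) n (by omega)
  unfold Nat.toDigits at h
  rw [h] at hm
  rw [hm] at hn
  omega

lemma pvToStr_inj (a b : Int) (ha : 0 ≤ a) (hb : 0 ≤ b)
    (h : PySem.Int.toStr a = PySem.Int.toStr b) : a = b := by
  have h' : (PySem.Int.toStr a).toList = (PySem.Int.toStr b).toList := by rw [h]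
  rw [PySem.Int.toList_toStr, PySem.Int.toList_toStr] at h'
  unfold PySem.Int.toChars at h'
  rw [if_neg (by omega), if_neg (by omega)] at h'
  have := pvToDigits_inj _ _ h'
  omega

lemma pvAttKey_inj (a b : Int) (ha : 0 ≤ a) (hb : 0 ≤ b)
    (h : "attempt_" ++ PySem.Int.toStr a = "attempt_" ++ PySem.Int.toStr b) : a = b := by
  apply pvToStr_inj a b ha hb
  have h' : ("attempt_" ++ PySem.Int.toStr a).toList = ("attempt_" ++ PySem.Int.toStr b).toList := by rw [h]
  simp only [String.toList_append] at h'
  have h2 := List.append_cancel_left h'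
  exact String.toList_inj.mp h2

-- ---- the attempt dict: items and size ----
lemma pvAttD_items (vals : List (List (List Int))) : (pvAttD vals).items = pvAttItems vals := by
  unfold pvAttD pvAttItems
  have h := PySem.Dict.items_foldl_insert_fresh (PySem.List.enumerate vals 1)
    (fun jp => "attempt_" ++ PySem.Int.toStr jp.1) (fun jp => jp.2) PySem.Dict.empty
    (fun a _ => by simp [PySem.Dict.contains_empty])
    (by
      have hp := PySem.List.pairwise_lt_enumerate vals 1
      refine (List.pairwise_map).mpr (List.Pairwise.imp_of_mem ?_ hp)
      intro p q hp' hq' hlt heq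
      rcases (PySem.List.mem_enumerate_iff _ _ _).mp hp' with ⟨k1, hk1, rfl⟩
      rcases (PySem.List.mem_enumerate_iff _ _ _).mp hq' with ⟨k2, hk2, rfl⟩
      have := pvAttKey_inj _ _ (by omega) (by omega) heq
      omega)
  simpa [PySem.Dict.empty] using h

lemma pvAttD_size (vals : List (List (List Int))) : (pvAttD vals).size = vals.length := by
  have h : (pvAttD vals).size = (pvAttD vals).items.length := rfl
  rw [h, pvAttD_items]
  simp [pvAttItems, PySem.List.length_enumerate]

lemma pvAttD_extend (acc vals : List (List (List Int))) :
    (PySem.List.enumerate vals (((pvAttD acc).size : Int) + 1)).foldl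
      (fun d jp => d.insert ("attempt_" ++ PySem.Int.toStr jp.1) jp.2) (pvAttD acc)
    = pvAttD (acc ++ vals) := by
  rw [pvAttD_size]
  conv_rhs => rw [pvAttD]
  rw [PySem.List.enumerate_append, List.foldl_append]
  have h : (1 : Int) + (acc.length : Int) = (acc.length : Int) + 1 := by ring
  rw [h]
  rfl

-- ---- collapsing the in-place sample update loop ----
lemma pvInner (i : Int) (h0 : 0 ≤ i) : ∀ (es : List (Int × List (List Int))) (ss : List pvSD),
    i < (ss.length : Int) →
    es.foldl (fun ss jp => PySem.List.pySetD ss i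
        ((PySem.List.pyGetD ss i PySem.Dict.empty).insert ("attempt_" ++ PySem.Int.toStr jp.1) jp.2)) ss
    = ss.set i.toNat (es.foldl (fun d jp => d.insert ("attempt_" ++ PySem.Int.toStr jp.1) jp.2)
        (PySem.List.pyGetD ss i PySem.Dict.empty)) := by
  intro es
  induction es with
  | nil =>
    intro ss hlen
    have hi : i.toNat < ss.length := by omega
    simp only [List.foldl_nil]
    rw [PySem.List.pyGetD_eq_getElem ss _ h0 hlen, List.set_getElem_self]
  | cons jp es ih =>
    intro ss hlen
    simp only [List.foldl_cons]
    have hi : i.toNat < ss.length := by omega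
    rw [PySem.List.pySetD_of_nonneg _ _ h0]
    rw [ih _ (by simp only [List.length_set]; omega)]
    have hv : PySem.List.pyGetD (ss.set i.toNat ((PySem.List.pyGetD ss i PySem.Dict.empty).insert ("attempt_" ++ PySem.Int.toStr jp.1) jp.2)) i PySem.Dict.empty
        = (PySem.List.pyGetD ss i PySem.Dict.empty).insert ("attempt_" ++ PySem.Int.toStr jp.1) jp.2 := by
      rw [PySem.List.pyGetD_eq_getElem _ _ h0 (by simp only [List.length_set]; omega)]
      exact List.getElem_set_self (by simp only [List.length_set]; omega)
    simp only [hv, List.set_set]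

-- ---- getD through the per-op dict update ----
lemma pvModifyFold {ν : Type} (u : Int × ν → List pvSD → List pvSD) (tid : String) :
    ∀ (es : List (Int × ν)) (c : PySem.Dict String (List pvSD)) (tid' : String),
    (es.foldl (fun c jp => c.modify tid [] (u jp)) c).getD tid' []
    = if tid' = tid then es.foldl (fun ss jp => u jp ss) (c.getD tid []) else c.getD tid' [] := by
  intro es
  induction es with
  | nil =>
    intro c tid'
    simp only [List.foldl_nil]
    by_cases h : tid' = tid
    · rw [if_pos h, h]
    · rw [if_neg h]
  | cons jp es ih =>
    intro c tid'
    simp only [List.foldl_cons]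
    rw [ih]
    by_cases h : tid' = tid
    · subst h
      simp
    · simp [PySem.Dict.getD_modify, h]

lemma pvModifyFold_keys {ν : Type} (u : Int × ν → List pvSD → List pvSD) (tid : String) :
    ∀ (es : List (Int × ν)) (c : PySem.Dict String (List pvSD)), tid ∈ c.keys →
    (es.foldl (fun c jp => c.modify tid [] (u jp)) c).keys = c.keys := by
  intro es
  induction es with
  | nil => intro c _; rfl
  | cons jp es ih =>
    intro c hmem
    simp only [List.foldl_cons]
    have hc : (c.modify tid [] (u jp)).keys = c.keys := by
      rw [PySem.Dict.keys_modify, PySem.Dict.keys_insert_of_contains]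
      exact (PySem.Dict.contains_iff_mem_keys c tid).mpr hmem
    rw [ih _ (by rw [hc]; exact hmem), hc]

lemma pvFill_getD : ∀ (ops : List ((String × Int) × List (List (List Int))))
    (c : PySem.Dict String (List pvSD)) (tid : String),
    (ops.foldl pvStep c).getD tid []
    = (ops.filter (fun op => op.1.1 = tid)).foldl pvStepT (c.getD tid []) := by
  intro ops
  induction ops with
  | nil => intro c tid; rfl
  | cons op ops ih =>
    intro c tid
    simp only [List.foldl_cons]
    rw [ih]
    by_cases h : op.1.1 = tid
    · have hstep : (pvStep c op).getD tid [] = pvStepT (c.getD tid []) op := by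
        unfold pvStep pvStepT
        rw [pvModifyFold]
        rw [if_pos h.symm, h]
      rw [hstep, List.filter_cons, if_pos (by simp [h]), List.foldl_cons]
    · have hstep : (pvStep c op).getD tid [] = c.getD tid [] := by
        unfold pvStep
        rw [pvModifyFold]
        rw [if_neg (mt Eq.symm h)]
      rw [hstep, List.filter_cons, if_neg (by simp [h])]

lemma pvFill_keys : ∀ (ops : List ((String × Int) × List (List (List Int))))
    (c : PySem.Dict String (List pvSD)), (∀ op ∈ ops, op.1.1 ∈ c.keys) →
    (ops.foldl pvStep c).keys = c.keys := by
  intro ops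
  induction ops with
  | nil => intro c _; rfl
  | cons op ops ih =>
    intro c hmem
    simp only [List.foldl_cons]
    have hc : (pvStep c op).keys = c.keys := by
      unfold pvStep
      exact pvModifyFold_keys _ _ _ _ (hmem op (by simp))
    rw [ih _ (by intro o ho; rw [hc]; exact hmem o (by simp [ho]))]
    exact hc

-- ---- the per-task fill over a samples list ----
lemma pvFillT : ∀ (opsT : List ((String × Int) × List (List (List Int))))
    (ss : List pvSD) (g : Nat → List (List (List Int))),
    (∀ op ∈ opsT, 0 ≤ op.1.2 ∧ op.1.2 < (ss.length : Int)) →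
    (∀ k, k < ss.length → ss[k]? = some (pvAttD (g k))) →
    (opsT.foldl pvStepT ss).length = ss.length ∧
    (∀ k, k < ss.length → (opsT.foldl pvStepT ss)[k]?
      = some (pvAttD (g k ++ (opsT.filter (fun op => op.1.2 = (k : Int))).flatMap (fun op => op.2)))) := by
  intro opsT
  induction opsT with
  | nil =>
    intro ss g _ hss
    refine ⟨rfl, ?_⟩
    intro k hk
    simp only [List.foldl_nil, List.filter_nil, List.flatMap_nil, List.append_nil]
    exact hss k hk
  | cons op opsT ih =>
    intro ss g hb hss
    have hop := hb op (by simp)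
    have hiN : op.1.2.toNat < ss.length := by omega
    have hstep : pvStepT ss op = ss.set op.1.2.toNat (pvAttD (g op.1.2.toNat ++ op.2)) := by
      unfold pvStepT
      have hd : PySem.List.pyGetD ss op.1.2 PySem.Dict.empty = pvAttD (g op.1.2.toNat) := by
        rw [PySem.List.pyGetD_eq_getElem ss _ hop.1 hop.2]
        have h2 := hss op.1.2.toNat hiN
        rw [List.getElem?_eq_getElem hiN] at h2
        exact Option.some.inj h2
      rw [pvInner op.1.2 hop.1 _ ss (by omega), hd, pvAttD_extend]
    rw [List.foldl_cons, hstep]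
    have hlen : (ss.set op.1.2.toNat (pvAttD (g op.1.2.toNat ++ op.2))).length = ss.length := by simp
    obtain ⟨ihlen, ihget⟩ := ih (ss.set op.1.2.toNat (pvAttD (g op.1.2.toNat ++ op.2)))
      (fun k => if (k : Int) = op.1.2 then g k ++ op.2 else g k)
      (by intro o ho; have := hb o (by simp [ho]); omega)
      (by
        intro k hk
        rw [hlen] at hk
        by_cases hke : k = op.1.2.toNat
        · subst hke
          rw [List.getElem?_set_self (by omega)]
          beta_reduce
          rw [if_pos (by omega)]
        · rw [List.getElem?_set_ne (by omega)]
          beta_reduce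
          rw [if_neg (by omega), hss k hk])
    constructor
    · rw [ihlen, hlen]
    · intro k hk
      rw [ihget k (by omega)]
      by_cases hke : (k : Int) = op.1.2
      · rw [if_pos hke, List.filter_cons, if_pos (by simp [hke.symm]), List.flatMap_cons,
          List.append_assoc]
      · rw [if_neg hke, List.filter_cons, if_neg (by simp; omega)]

-- ---- bounds on the operations list ----
lemma pvOps_mem {subs : List (List (String × List (List (String × List (List Int)))))}
    {op : (String × Int) × List (List (List Int))} (h : op ∈ pvOps subs) :
    ∃ s ∈ subs, ∃ tp ∈ s, ∃ (k : Nat), ∃ (hk : k < tp.2.length),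
      op = ((tp.1, (k : Int)), ((tp.2[k]).map Prod.snd)) := by
  simp only [pvOps, List.mem_flatMap, List.mem_map] at h
  obtain ⟨s, hs, tp, htp, ip, hip, rfl⟩ := h
  rcases (PySem.List.mem_enumerate_iff _ _ _).mp hip with ⟨k, hk, rfl⟩
  exact ⟨s, hs, tp, htp, k, hk, by simp⟩

lemma pvNmax_fold_le (tid : String) : ∀ (l : List (List (String × List (List (String × List (List Int)))))) (m : Nat),
    m ≤ l.foldl (fun m submission =>
      if (PySem.Dict.mk submission).contains tid then
        max m ((PySem.Dict.mk submission).getD tid []).length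
      else m) m := by
  intro l
  induction l with
  | nil => intro m; simp
  | cons s l ih =>
    intro m
    refine le_trans ?_ (ih _)
    by_cases h : (PySem.Dict.mk s).contains tid <;> simp [h]

lemma pvNmax_ge {subs : List (List (String × List (List (String × List (List Int)))))}
    (hpre : Pre_concatenate_submissions subs)
    {s : List (String × List (List (String × List (List Int))))} (hs : s ∈ subs)
    {tp : String × List (List (String × List (List Int)))} (htp : tp ∈ s) :
    tp.2.length ≤ pvNmax subs tp.1 := by
  obtain ⟨l1, l2, rfl⟩ := List.append_of_mem hs
  unfold pvNmax
  rw [List.foldl_append, List.foldl_cons]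
  refine le_trans ?_ (pvNmax_fold_le _ _ _)
  have hcont : (PySem.Dict.mk s).contains tp.1 = true := by
    rw [PySem.Dict.contains_iff_mem_keys]
    simp only [PySem.Dict.keys_mk]
    exact List.mem_map_of_mem htp
  rw [if_pos hcont]
  have hget : (PySem.Dict.mk s).getD tp.1 [] = tp.2 := by
    have hitems : (tp.1, tp.2) ∈ (PySem.Dict.mk s).items := htp
    have hnd : (PySem.Dict.mk s).keys.Nodup := by
      simp only [PySem.Dict.keys_mk]
      exact hpre s (by simp)
    rw [PySem.Dict.getD_eq_get?_getD, PySem.Dict.get?_of_mem_items _ hitems hnd]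
    rfl
  rw [hget]
  omega

lemma pvOps_bound {subs : List (List (String × List (List (String × List (List Int)))))}
    (hpre : Pre_concatenate_submissions subs)
    {op : (String × Int) × List (List (List Int))} (h : op ∈ pvOps subs) :
    0 ≤ op.1.2 ∧ op.1.2 < (pvNmax subs op.1.1 : Int) := by
  obtain ⟨s, hs, tp, htp, k, hk, rfl⟩ := pvOps_mem h
  have := pvNmax_ge hpre hs htp
  simp only []
  constructor
  · positivity
  · omega

lemma pvOps_key_mem {subs : List (List (String × List (List (String × List (List Int)))))}
    {op : (String × Int) × List (List (List Int))} (h : op ∈ pvOps subs) :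
    op.1.1 ∈ pvTaskIds subs := by
  obtain ⟨s, hs, tp, htp, k, hk, rfl⟩ := pvOps_mem h
  rw [pvTaskIds, PySem.Set.mem_ofList, pvKeysList]
  simp only [List.mem_flatMap]
  exact ⟨s, hs, List.mem_map_of_mem htp⟩

-- ---- the empty submission skeleton ----
lemma pvCreateEmpty_items (subs : List (List (String × List (List (String × List (List Int)))))) :
    (pvCreateEmpty subs).items
    = (pvTaskIds subs).map (fun tid => (tid, List.replicate (pvNmax subs tid) PySem.Dict.empty)) := by
  unfold pvCreateEmpty
  rw [PySem.List.foldl_append_eq_flatMap (fun s => s.map Prod.fst) subs []]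
  have h := PySem.Dict.items_foldl_insert_fresh (PySem.Set.ofList ([] ++ subs.flatMap (fun s => s.map Prod.fst)))
    (fun tid => tid) (fun tid => List.replicate (pvNmax subs tid) (PySem.Dict.empty : pvSD)) PySem.Dict.empty
    (fun a _ => by simp [PySem.Dict.contains_empty])
    (by simp only [List.map_id_fun', id]; exact PySem.Set.nodup_ofList _)
  simpa [pvTaskIds, pvKeysList, pvNmax, PySem.Dict.empty] using h

lemma pvCreateEmpty_keys (subs : List (List (String × List (List (String × List (List Int)))))) :
    (pvCreateEmpty subs).keys = pvTaskIds subs := by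
  have h : (pvCreateEmpty subs).keys = (pvCreateEmpty subs).items.map Prod.fst := rfl
  rw [h, pvCreateEmpty_items, List.map_map]
  simp [Function.comp_def]

lemma pvCreateEmpty_getD {subs : List (List (String × List (List (String × List (List Int)))))}
    {tid : String} (htid : tid ∈ pvTaskIds subs) :
    (pvCreateEmpty subs).getD tid [] = List.replicate (pvNmax subs tid) PySem.Dict.empty := by
  have hnd : (pvCreateEmpty subs).keys.Nodup := by
    rw [pvCreateEmpty_keys]; exact PySem.Set.nodup_ofList _
  have hmem : (tid, List.replicate (pvNmax subs tid) (PySem.Dict.empty : pvSD)) ∈ (pvCreateEmpty subs).items := by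
    rw [pvCreateEmpty_items]
    exact List.mem_map_of_mem htid
  rw [PySem.Dict.getD_eq_get?_getD, PySem.Dict.get?_of_mem_items _ hmem hnd]
  rfl

-- ---- A's nested fill loop is the fold of pvStep over pvOps ----
lemma pvA_flatten (subs : List (List (String × List (List (String × List (List Int))))))
    (c0 : PySem.Dict String (List pvSD)) :
    subs.foldl (fun conc submission =>
      submission.foldl (fun conc tp =>
        (PySem.List.enumerate tp.2).foldl (fun conc sp =>
          (PySem.List.enumerate (sp.2.map Prod.snd)
              (((PySem.List.pyGetD (conc.getD tp.1 []) sp.1 PySem.Dict.empty).size : Int) + 1)).foldl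
            (fun conc ap => conc.modify tp.1 [] (fun samples =>
              PySem.List.pySetD samples sp.1
                ((PySem.List.pyGetD samples sp.1 PySem.Dict.empty).insert
                  ("attempt_" ++ PySem.Int.toStr ap.1) ap.2))) conc) conc) conc) c0
    = (pvOps subs).foldl pvStep c0 := by
  rw [pvOps, List.foldl_flatMap]
  congr 1
  funext conc submission
  rw [List.foldl_flatMap]
  congr 1
  funext conc tp
  rw [List.foldl_map]
  rfl

theorem pvA_canon (subs : List (List (String × List (List (String × List (List Int))))))
    (hpre : Pre_concatenate_submissions subs) :
    concatenate_submissions subs = pvCanon subs := by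
  simp only [concatenate_submissions]
  rw [pvA_flatten]
  have hkeys : ((pvOps subs).foldl pvStep (pvCreateEmpty subs)).keys = pvTaskIds subs := by
    rw [pvFill_keys _ _ (by
      intro op hop
      rw [pvCreateEmpty_keys]
      exact pvOps_key_mem hop)]
    exact pvCreateEmpty_keys subs
  have hnodup : ((pvOps subs).foldl pvStep (pvCreateEmpty subs)).keys.Nodup := by
    rw [hkeys]; exact PySem.Set.nodup_ofList _
  rw [PySem.Dict.items_eq_map_keys _ hnodup [], hkeys, List.map_map, pvCanon]
  apply List.map_congr_left
  intro tid htid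
  simp only [Function.comp]
  congr 1
  have hfill := pvFill_getD (pvOps subs) (pvCreateEmpty subs) tid
  rw [pvCreateEmpty_getD htid] at hfill
  obtain ⟨hlen, hget⟩ := pvFillT ((pvOps subs).filter (fun op => op.1.1 = tid))
    (List.replicate (pvNmax subs tid) PySem.Dict.empty) (fun _ => [])
    (by
      intro op hop
      have h1 := List.mem_of_mem_filter hop
      have h2 := List.of_mem_filter hop
      have := pvOps_bound hpre h1
      simp only [List.length_replicate]
      rw [decide_eq_true_eq] at h2
      rw [h2] at this
      exact this)
    (by
      intro k hk
      rw [List.getElem?_replicate, if_pos (by simpa using hk)]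
      rfl)
  rw [hfill]
  apply List.ext_getElem?
  intro k
  by_cases hk : k < pvNmax subs tid
  · rw [List.getElem?_map, hget k (by simpa using hk)]
    rw [List.getElem?_map, List.getElem?_range hk]
    simp only [Option.map_some]
    congr 1
    rw [pvAttD_items]
    congr 1
    rw [List.nil_append, List.filter_filter, pvCollect]
    congr 1
    apply List.filter_congr
    intro op _
    rcases op with ⟨⟨a, b⟩, c⟩
    simp [Prod.ext_iff, Bool.and_comm]
  · rw [List.getElem?_map, List.getElem?_map]
    rw [List.getElem?_eq_none, List.getElem?_eq_none] <;>
      simp_all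

-- ---- B side ----
def pvPairs (submissions : List (List (String × List (List (String × List (List Int)))))) :
    List (String × List (List (String × List (List Int)))) :=
  submissions.flatMap (fun s => s)

def pvColF (col : PySem.Dict (String × Int) (List (List (List Int))))
    (tp : String × List (List (String × List (List Int)))) :
    PySem.Dict (String × Int) (List (List (List Int))) :=
  (PySem.List.enumerate tp.2).foldl (fun col ip =>
    col.modify (tp.1, ip.1) [] (· ++ ip.2.map Prod.snd)) col

def pvNsF (ns : PySem.Dict String Int) (tp : String × List (List (String × List (List Int)))) :
    PySem.Dict String Int :=
  ns.insert tp.1 (max (ns.getD tp.1 0) (tp.2.length : Int))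

def pvColStep (a : PySem.Dict (String × Int) (List (List (List Int))))
    (op : (String × Int) × List (List (List Int))) :
    PySem.Dict (String × Int) (List (List (List Int))) :=
  a.modify op.1 [] (· ++ op.2)

lemma pvFoldlProd {σ τ β : Type} (f : σ → β → σ) (g : τ → β → τ) :
    ∀ (l : List β) (a : σ) (b : τ),
    l.foldl (fun st x => (f st.1 x, g st.2 x)) (a, b) = (l.foldl f a, l.foldl g b) := by
  intro l
  induction l with
  | nil => intro a b; rfl
  | cons x l ih => intro a b; simp only [List.foldl_cons]; exact ih _ _

lemma pvB_split (subs : List (List (String × List (List (String × List (List Int))))))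
    (a : PySem.Dict (String × Int) (List (List (List Int)))) (b : PySem.Dict String Int) :
    subs.foldl (fun st submission =>
      submission.foldl (fun st tp => (pvColF st.1 tp, pvNsF st.2 tp)) st) (a, b)
    = (subs.foldl (fun a sub => sub.foldl pvColF a) a,
       subs.foldl (fun b sub => sub.foldl pvNsF b) b) := by
  have h : (fun (st : PySem.Dict (String × Int) (List (List (List Int))) × PySem.Dict String Int)
        (submission : List (String × List (List (String × List (List Int))))) =>
      submission.foldl (fun st tp => (pvColF st.1 tp, pvNsF st.2 tp)) st)
      = (fun st submission => (submission.foldl pvColF st.1, submission.foldl pvNsF st.2)) := by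
    funext st sub
    rcases st with ⟨a', b'⟩
    exact pvFoldlProd pvColF pvNsF sub a' b'
  rw [h]
  exact pvFoldlProd (fun a sub => sub.foldl pvColF a) (fun b sub => sub.foldl pvNsF b) subs a b

lemma pvCol_flatten (subs : List (List (String × List (List (String × List (List Int))))))
    (a : PySem.Dict (String × Int) (List (List (List Int)))) :
    subs.foldl (fun a sub => sub.foldl pvColF a) a = (pvOps subs).foldl pvColStep a := by
  rw [pvOps, List.foldl_flatMap]
  congr 1
  funext a sub
  rw [List.foldl_flatMap]
  congr 1
  funext a tp
  rw [List.foldl_map]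
  rfl

lemma pvNs_flatten (subs : List (List (String × List (List (String × List (List Int))))))
    (b : PySem.Dict String Int) :
    subs.foldl (fun b sub => sub.foldl pvNsF b) b = (pvPairs subs).foldl pvNsF b := by
  rw [pvPairs, List.foldl_flatMap]

lemma pvNs_keys (subs : List (List (String × List (List (String × List (List Int)))))) :
    ((pvPairs subs).foldl pvNsF PySem.Dict.empty).keys = pvTaskIds subs := by
  have h := PySem.Dict.keys_foldl_insert_key (pvPairs subs) Prod.fst
    (fun d tp => max (d.getD tp.1 0) (tp.2.length : Int)) PySem.Dict.empty
  have h2 : ((pvPairs subs).map Prod.fst) = pvKeysList subs := by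
    rw [pvPairs, pvKeysList, List.map_flatMap]
  unfold pvNsF
  rw [h, h2, PySem.Dict.keys_empty, PySem.Set.update_nil_left, pvTaskIds]

lemma pvNs_nodup (subs : List (List (String × List (List (String × List (List Int)))))) :
    ((pvPairs subs).foldl pvNsF PySem.Dict.empty).keys.Nodup := by
  rw [pvNs_keys]
  exact PySem.Set.nodup_ofList _

lemma pvMaxFold_getD : ∀ (l : List (String × List (List (String × List (List Int)))))
    (d : PySem.Dict String Int) (c : String),
    (l.foldl pvNsF d).getD c 0
    = (l.filter (fun p => p.1 = c)).foldl (fun m p => max m (p.2.length : Int)) (d.getD c 0) := by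
  intro l
  induction l with
  | nil => intro d c; rfl
  | cons p l ih =>
    intro d c
    simp only [List.foldl_cons]
    rw [ih, List.filter_cons]
    by_cases h : p.1 = c
    · rw [if_pos (by simp [h]), List.foldl_cons]
      unfold pvNsF
      rw [PySem.Dict.getD_insert, if_pos h.symm, h]
    · rw [if_neg (by simp [h])]
      unfold pvNsF
      rw [PySem.Dict.getD_insert, if_neg (mt Eq.symm h)]

lemma pvColFold_getD : ∀ (l : List ((String × Int) × List (List (List Int))))
    (d : PySem.Dict (String × Int) (List (List (List Int)))) (c : String × Int),
    (l.foldl pvColStep d).getD c []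
    = d.getD c [] ++ (l.filter (fun op => op.1 = c)).flatMap (fun op => op.2) := by
  intro l
  induction l with
  | nil => intro d c; simp
  | cons op l ih =>
    intro d c
    simp only [List.foldl_cons]
    rw [ih, List.filter_cons]
    by_cases h : op.1 = c
    · rw [if_pos (by simp [h]), List.flatMap_cons]
      unfold pvColStep
      rw [PySem.Dict.getD_modify, if_pos h.symm, h, List.append_assoc]
    · rw [if_neg (by simp [h])]
      unfold pvColStep
      rw [PySem.Dict.getD_modify, if_neg (mt Eq.symm h)]

lemma pvMaxSub_eq {s : List (String × List (List (String × List (List Int))))}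
    (hnd : (s.map Prod.fst).Nodup) (tid : String) :
    ∀ (m : Int), (s.filter (fun p => p.1 = tid)).foldl (fun m p => max m (p.2.length : Int)) m
    = if (PySem.Dict.mk s).contains tid then
        max m (((PySem.Dict.mk s).getD tid []).length : Int)
      else m := by
  induction s with
  | nil => intro m; simp [PySem.Dict.contains_mk]
  | cons p s ih =>
    intro m
    rcases p with ⟨a, v⟩
    simp only [List.map_cons, List.nodup_cons] at hnd
    rw [List.filter_cons]
    by_cases h : a = tid
    · subst h
      rw [if_pos (by simp), List.foldl_cons]
      have hfilter : s.filter (fun p => p.1 = a) = [] := by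
        apply List.filter_eq_nil_iff.mpr
        intro q hq
        simp only [decide_eq_true_eq]
        intro hq1
        exact hnd.1 (hq1 ▸ List.mem_map_of_mem hq)
      rw [hfilter]
      have hcont : (PySem.Dict.mk ((a, v) :: s)).contains a = true := by
        rw [PySem.Dict.contains_iff_mem_keys]
        simp [PySem.Dict.keys_mk]
      rw [if_pos hcont]
      have hget : (PySem.Dict.mk ((a, v) :: s)).getD a [] = v := by
        rw [PySem.Dict.getD_eq_get?_getD, PySem.Dict.get?_mk_cons]
        simp
      rw [hget]
      rfl
    · rw [if_neg (by simp [h]), ih hnd.2]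
      have hcont : (PySem.Dict.mk ((a, v) :: s)).contains tid = (PySem.Dict.mk s).contains tid := by
        simp only [PySem.Dict.contains_mk]
        simp [h]
      have hget : (PySem.Dict.mk ((a, v) :: s)).getD tid [] = (PySem.Dict.mk s).getD tid [] := by
        rw [PySem.Dict.getD_eq_get?_getD, PySem.Dict.get?_mk_cons, PySem.Dict.getD_eq_get?_getD]
        rw [if_neg (by simp [h])]
      rw [hcont, hget]

lemma pvMax_eq {subs : List (List (String × List (List (String × List (List Int)))))}
    (hpre : Pre_concatenate_submissions subs) (tid : String) :
    ((pvPairs subs).filter (fun p => p.1 = tid)).foldl (fun m p => max m (p.2.length : Int)) 0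
    = ((pvNmax subs tid : Nat) : Int) := by
  rw [pvPairs, List.filter_flatMap, List.foldl_flatMap]
  unfold pvNmax
  have hgen : ∀ (l : List (List (String × List (List (String × List (List Int)))))),
      (∀ s ∈ l, (s.map Prod.fst).Nodup) → ∀ (m : Nat),
      l.foldl (fun m s => (s.filter (fun p => p.1 = tid)).foldl (fun m p => max m (p.2.length : Int)) m) ((m : Nat) : Int)
      = ((l.foldl (fun m submission =>
          if (PySem.Dict.mk submission).contains tid then
            max m ((PySem.Dict.mk submission).getD tid []).length
          else m) m : Nat) : Int) := by
    intro l
    induction l with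
    | nil => intro _ m; rfl
    | cons s l ih =>
      intro hnd m
      simp only [List.foldl_cons]
      rw [pvMaxSub_eq (hnd s (by simp)) tid]
      by_cases h : (PySem.Dict.mk s).contains tid
      · rw [if_pos h, if_pos h]
        rw [show (max ((m : Nat) : Int) (((PySem.Dict.mk s).getD tid []).length : Int))
            = ((max m ((PySem.Dict.mk s).getD tid []).length : Nat) : Int) by simp [Nat.cast_max]]
        exact ih (fun s hs => hnd s (by simp [hs])) _
      · rw [if_neg h, if_neg h]
        exact ih (fun s hs => hnd s (by simp [hs])) _
  exact hgen subs hpre 0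

theorem pvB_canon (subs : List (List (String × List (List (String × List (List Int))))))
    (hpre : Pre_concatenate_submissions subs) :
    concatenate_submissions_alt subs = pvCanon subs := by
  simp only [concatenate_submissions_alt]
  have hshape : (fun (st : PySem.Dict (String × Int) (List (List (List Int))) × PySem.Dict String Int)
        (submission : List (String × List (List (String × List (List Int))))) =>
      submission.foldl (fun st tp =>
        (pvColF st.1 tp, pvNsF st.2 tp)) st)
      = (fun st (submission : List (String × List (List (String × List (List Int))))) =>
      submission.foldl (fun st tp =>
        ((PySem.List.enumerate tp.2).foldl (fun col ip =>
            col.modify (tp.1, ip.1) [] (· ++ ip.2.map Prod.snd)) st.1,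
         st.2.insert tp.1 (max (st.2.getD tp.1 0) (tp.2.length : Int)))) st) := rfl
  rw [← hshape, pvB_split, pvCol_flatten, pvNs_flatten]
  rw [PySem.Dict.items_eq_map_keys _ (pvNs_nodup subs) 0, pvNs_keys, List.map_map, pvCanon]
  apply List.map_congr_left
  intro tid htid
  simp only [Function.comp]
  congr 1
  rw [pvMaxFold_getD]
  have hd0 : (PySem.Dict.empty : PySem.Dict String Int).getD tid 0 = 0 := rfl
  rw [hd0, pvMax_eq hpre tid]
  rw [PySem.List.pyRange_one]
  rw [show ((((pvNmax subs tid : Nat) : Int)) - 0).toNat = pvNmax subs tid by omega]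
  rw [List.map_map]
  apply List.map_congr_left
  intro k hk
  simp only [Function.comp]
  rw [zero_add]
  have hcol : ((pvOps subs).foldl pvColStep PySem.Dict.empty).getD (tid, (k : Int)) []
      = pvCollect subs tid (k : Int) := by
    rw [pvColFold_getD]
    rfl
  rw [hcol]
  exact pvAttD_items (pvCollect subs tid (k : Int))

-- ===== VERDICT (by name: the statement is the Claim_ definition above) =====
theorem concatenate_submissions_spec : Claim_equal_concatenate_submissions := by
  intro subs _ hpre
  unfold Spec_concatenate_submissions
  rw [pvA_canon subs hpre, pvB_canon subs hpre]
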